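-- pv_equiv track=rewrite | github.com/T-800/Photos | photo.py | min_moy_max_Vert
-- ===== SOURCE A (Python) =====
-- def min_moy_max_Vert(liste):
--     moy = 0
--     mini = 0
--     maxi = 0
--     for elt in liste:
--         moy += elt[1]
--         if elt[1] <= mini:
--             mini = elt[1]
--         if elt[1] > maxi:
--             maxi = elt[1]
--     return mini, moy//len(liste), maxi
-- ===== SOURCE B (Python) =====
-- def min_moy_max_Vert(liste):
--     vals = sorted(elt[1] for elt in liste)
--     total = sum(vals)
--     return min(0, vals[0]), total // len(vals), max(0, vals[-1])
-- ===== Notes on version B (the rewrite author's own statement) =====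
-- stated objective: alternative
-- what changed: Sorts the projected second components and reads the extrema off the ends of the sorted list (clamped at 0, as A's zero-initialized accumulators do), instead of A's fused single-pass min/max/sum loop.
import Mathlib
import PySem

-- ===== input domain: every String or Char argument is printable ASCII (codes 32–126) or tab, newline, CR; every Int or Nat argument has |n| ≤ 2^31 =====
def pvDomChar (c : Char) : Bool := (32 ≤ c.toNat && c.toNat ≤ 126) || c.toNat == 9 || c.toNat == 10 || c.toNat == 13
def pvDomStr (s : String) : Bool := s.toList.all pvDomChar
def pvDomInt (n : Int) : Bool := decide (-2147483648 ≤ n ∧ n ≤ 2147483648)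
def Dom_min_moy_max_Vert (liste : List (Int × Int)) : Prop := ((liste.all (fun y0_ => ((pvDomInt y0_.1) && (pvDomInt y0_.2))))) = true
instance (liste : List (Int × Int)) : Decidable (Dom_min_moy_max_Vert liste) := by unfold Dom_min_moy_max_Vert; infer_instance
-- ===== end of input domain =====

-- B sorts the projected second components and reads min/max off the ends of the sorted list
-- (clamped at 0, matching A's zero-initialized accumulators); alternative algorithm, not faster.

-- ===== PORT A =====
def min_moy_max_Vert (liste : List (Int × Int)) : Int × Int × Int :=
  let s := liste.foldl (fun s elt =>
    let moy := s.1 + elt.2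
    let mini := if elt.2 ≤ s.2.1 then elt.2 else s.2.1
    let maxi := if elt.2 > s.2.2 then elt.2 else s.2.2
    (moy, mini, maxi)) ((0 : Int), (0 : Int), (0 : Int))
  (s.2.1, PySem.Int.floordiv s.1 (liste.length : Int), s.2.2)

-- ===== PORT B =====
def min_moy_max_Vert_alt (liste : List (Int × Int)) : Int × Int × Int :=
  let vals := PySem.List.sorted (liste.map (fun elt => elt.2)) (fun y => y) false
  let total := vals.foldl (· + ·) 0
  (min 0 ((PySem.List.pyGet? vals 0).getD 0),
   PySem.Int.floordiv total (vals.length : Int),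
   max 0 ((PySem.List.pyGet? vals (-1)).getD 0))

-- ===== PRECONDITION & SPEC =====
-- Pre_ excludes only the empty list, on which A raises ZeroDivisionError (and B IndexError).
def Pre_min_moy_max_Vert (liste : List (Int × Int)) : Prop := liste ≠ []
instance (liste : List (Int × Int)) : Decidable (Pre_min_moy_max_Vert liste) := by unfold Pre_min_moy_max_Vert; infer_instance
def pvWitness_min_moy_max_Vert : (List (Int × Int)) := [(1, 2)]
def Spec_min_moy_max_Vert (liste : List (Int × Int)) (out : Int × Int × Int) : Prop := out = min_moy_max_Vert_alt liste
instance (liste : List (Int × Int)) (out : Int × Int × Int) : Decidable (Spec_min_moy_max_Vert liste out) := by unfold Spec_min_moy_max_Vert; infer_instance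

-- ===== CLAIM (what is proved, stated in full; the proofs are below) =====
def Claim_equal_min_moy_max_Vert : Prop := ∀ (liste : List (Int × Int)), Dom_min_moy_max_Vert liste → Pre_min_moy_max_Vert liste → Spec_min_moy_max_Vert liste (min_moy_max_Vert liste)

-- ===== LEMMAS AND PROOFS =====

-- A's fused loop is the triple of three independent folds.
theorem pv_fuse (l : List (Int × Int)) (m mi ma : Int) :
    l.foldl (fun s elt =>
      (s.1 + elt.2,
       if elt.2 ≤ s.2.1 then elt.2 else s.2.1,
       if elt.2 > s.2.2 then elt.2 else s.2.2)) (m, mi, ma)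
    = (l.foldl (fun a e => a + e.2) m,
       l.foldl (fun a e => min a e.2) mi,
       l.foldl (fun a e => max a e.2) ma) := by
  induction l generalizing m mi ma with
  | nil => rfl
  | cons h t ih =>
      have h1 : (if h.2 ≤ mi then h.2 else mi) = min mi h.2 := by split <;> omega
      have h2 : (if h.2 > ma then h.2 else ma) = max ma h.2 := by split <;> omega
      simp only [List.foldl_cons, ih, h1, h2]

theorem pv_foldl_min_lower (t : List Int) (a m : Int) (h : ∀ y ∈ t, m ≤ y) :
    t.foldl min (min a m) = min a m := by
  induction t generalizing a with
  | nil => rfl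
  | cons x xs ih =>
      have hx : m ≤ x := h x (by simp)
      have : min (min a m) x = min a m := by omega
      simpa [this] using ih a (fun y hy => h y (by simp [hy]))

theorem pv_foldl_max_upper (t : List Int) (a m : Int) (h : ∀ y ∈ t, y ≤ m) :
    t.foldl max (max a m) = max a m := by
  induction t generalizing a with
  | nil => rfl
  | cons x xs ih =>
      have hx : x ≤ m := h x (by simp)
      have : max (max a m) x = max a m := by omega
      simpa [this] using ih a (fun y hy => h y (by simp [hy]))

theorem pv_foldl_min_mem (t : List Int) (a m : Int) (hm : m ∈ t) (h : ∀ y ∈ t, m ≤ y) :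
    t.foldl min a = min a m := by
  induction t generalizing a with
  | nil => simp at hm
  | cons x xs ih =>
      by_cases hx : m ∈ xs
      · have := ih (min a x) hx (fun y hy => h y (by simp [hy]))
        have hxm : m ≤ x := h x (by simp)
        rw [List.foldl_cons, this]; omega
      · have hmx : m = x := by rcases List.mem_cons.mp hm with h1 | h1; exact h1; exact absurd h1 hx
        subst hmx
        exact pv_foldl_min_lower xs a m (fun y hy => h y (by simp [hy]))

theorem pv_foldl_max_mem (t : List Int) (a m : Int) (hm : m ∈ t) (h : ∀ y ∈ t, y ≤ m) :
    t.foldl max a = max a m := by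
  induction t generalizing a with
  | nil => simp at hm
  | cons x xs ih =>
      by_cases hx : m ∈ xs
      · have := ih (max a x) hx (fun y hy => h y (by simp [hy]))
        have hxm : x ≤ m := h x (by simp)
        rw [List.foldl_cons, this]; omega
      · have hmx : m = x := by rcases List.mem_cons.mp hm with h1 | h1; exact h1; exact absurd h1 hx
        subst hmx
        exact pv_foldl_max_upper xs a m (fun y hy => h y (by simp [hy]))

theorem pv_foldl_add_eq_sum (t : List Int) (a : Int) : t.foldl (· + ·) a = a + t.sum := by
  induction t generalizing a with
  | nil => simp
  | cons x xs ih => simp [ih, add_assoc]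

-- ===== VERDICT (by name: the statement is the Claim_ definition above) =====
theorem min_moy_max_Vert_spec : Claim_equal_min_moy_max_Vert := by
  intro liste _ hne
  unfold Spec_min_moy_max_Vert min_moy_max_Vert min_moy_max_Vert_alt
  simp only [pv_fuse]
  set xs := liste.map (fun elt => elt.2) with hxs
  set vals := PySem.List.sorted xs (fun y => y) false with hvals
  have hperm : vals.Perm xs := PySem.List.sorted_perm xs (fun y => y) false
  have hxsne : xs ≠ [] := by
    rw [hxs]; simp only [ne_eq, List.map_eq_nil_iff]; exact hne
  have hvne : vals ≠ [] := by
    intro h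
    exact hxsne (List.Perm.eq_nil (h ▸ hperm.symm))
  obtain ⟨m, t, hcons⟩ := List.exists_cons_of_ne_nil hvne
  obtain ⟨z, ws, hrev⟩ := List.exists_cons_of_ne_nil (show vals.reverse ≠ [] by simpa)
  have hsnoc : vals = ws.reverse ++ [z] := by
    have := congrArg List.reverse hrev
    simpa using this
  -- sum and length via the permutation
  have hlen : vals.length = liste.length := by
    rw [hperm.length_eq, hxs, List.length_map]
  -- head of the sorted list is the minimum
  have hmin_head : ∀ y ∈ xs, m ≤ y :=
    PySem.List.key_head_sorted_le xs (fun y => y) (by rw [← hvals, hcons])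
  have hminA : liste.foldl (fun a (e : Int × Int) => min a e.2) (0 : Int) = min 0 m := by
    have hm : m ∈ xs := hperm.subset (by simp [hcons])
    have : liste.foldl (fun a (e : Int × Int) => min a e.2) (0 : Int) = xs.foldl min 0 := by
      rw [hxs, List.foldl_map]
    rw [this, pv_foldl_min_mem xs 0 m hm hmin_head]
  -- last of the sorted list is the maximum
  have hpw : vals.Pairwise (fun a b => a ≤ b) := PySem.List.sorted_pairwise xs (fun y => y)
  have hmax_last : ∀ y ∈ xs, y ≤ z := by
    intro y hy
    have hy' : y ∈ vals := hperm.symm.subset hy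
    rw [hsnoc] at hpw hy'
    rcases List.mem_append.mp hy' with h | h
    · exact (List.pairwise_append.mp hpw).2.2 y h z (by simp)
    · simp at h; omega
  have hmaxA : liste.foldl (fun a (e : Int × Int) => max a e.2) (0 : Int) = max 0 z := by
    have hz : z ∈ xs := hperm.subset (by simp [hsnoc])
    have : liste.foldl (fun a (e : Int × Int) => max a e.2) (0 : Int) = xs.foldl max 0 := by
      rw [hxs, List.foldl_map]
    rw [this, pv_foldl_max_mem xs 0 z hz hmax_last]
  -- assemble
  have hget0 : PySem.List.pyGet? vals 0 = some m := by rw [hcons]; exact PySem.List.pyGet?_zero_cons m t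
  have hgetl : PySem.List.pyGet? vals (-1) = some z := by
    rw [hsnoc]; exact PySem.List.pyGet?_neg_one_append_singleton ws.reverse z
  have hsum' : liste.foldl (fun a (e : Int × Int) => a + e.2) (0 : Int) = vals.foldl (· + ·) 0 := by
    have h1 : liste.foldl (fun a (e : Int × Int) => a + e.2) (0 : Int)
        = xs.foldl (· + ·) 0 := by rw [hxs, List.foldl_map]
    rw [h1, pv_foldl_add_eq_sum, pv_foldl_add_eq_sum, hperm.sum_eq]
  simp only [hget0, hgetl, Option.getD_some, hminA, hmaxA, hsum', hlen]
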